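-- pv_equiv track=rewrite | github.com/daniel-reich/ubiquitous-fiesta | JQnFS4sEoEFX4vP3q_12.py | product_pair
-- ===== SOURCE A (Python) =====
-- import itertools
--
-- def product_pair(lst, k):
--   if len(lst)<k:
--     return None
--   l=[]
--   for x in list(itertools.combinations(lst,k)):
--     a=1
--     for y in x:
--       if type(y)==int:
--         a*=y
--     l.append(a)
--   return (min(l),max(l))
-- ===== SOURCE B (Python) =====
-- def product_pair(lst, k):
--     if len(lst) < k:
--         return None
--     # dp[j] = (min product, max product) over all j-element subsets of the
--     # prefix processed so far, or None if no such subset exists yet.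
--     dp = [None] * (k + 1)
--     dp[0] = (1, 1)
--     for x in lst:
--         for j in range(k, 0, -1):
--             prev = dp[j - 1]
--             if prev is not None:
--                 lo, hi = prev
--                 c_lo = min(x * lo, x * hi)
--                 c_hi = max(x * lo, x * hi)
--                 cur = dp[j]
--                 if cur is None:
--                     dp[j] = (c_lo, c_hi)
--                 else:
--                     dp[j] = (min(cur[0], c_lo), max(cur[1], c_hi))
--     lo, hi = dp[k]
--     return (lo, hi)
-- ===== Notes on version B (the rewrite author's own statement) =====
-- stated objective: faster
-- what changed: replaces enumeration of all C(n,k) k-subsets (product per subset, then min/max) by a single-pass DP indexed by subset size that keeps only the minimum and maximum product for each count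
import Mathlib
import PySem

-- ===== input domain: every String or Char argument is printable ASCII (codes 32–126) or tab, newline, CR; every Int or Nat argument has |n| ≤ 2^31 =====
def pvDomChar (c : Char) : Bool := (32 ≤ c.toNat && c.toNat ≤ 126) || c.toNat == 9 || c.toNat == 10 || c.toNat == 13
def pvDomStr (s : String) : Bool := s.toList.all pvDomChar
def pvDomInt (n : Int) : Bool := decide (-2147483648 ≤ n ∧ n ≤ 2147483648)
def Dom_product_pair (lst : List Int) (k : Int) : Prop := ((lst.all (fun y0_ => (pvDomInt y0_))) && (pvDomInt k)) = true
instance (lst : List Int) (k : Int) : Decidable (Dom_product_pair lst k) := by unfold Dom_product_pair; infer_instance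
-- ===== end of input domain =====

-- B replaces A's enumeration of all k-subsets by a count-indexed min/max-product DP in one pass over the list.
-- ===== PORT A =====
-- Python's tuple result (min(l), max(l)) is rendered as the 2-element list [min, max].
def product_pair (lst : List Int) (k : Int) : Option (List Int) :=
  if (lst.length : Int) < k then none
  else
    -- 'if type(y)==int: a*=y' — every element of lst is an int, so the guard is always true
    let l := (PySem.List.combinations lst k.toNat).map (fun c => c.foldl (fun a y => a * y) 1)
    match PySem.List.min? l (fun v => v), PySem.List.max? l (fun v => v) with
    | some m, some M => some [m, M]
    | _, _ => none  -- unreachable: l is nonempty whenever the length guard above fails and k ≥ 0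

-- ===== PORT B =====
-- inner-loop body of Source B: the update of dp at index j (the dp[j-1] / dp[j] reads are in range on Pre_)
def pvStepJ (x : Int) (dp : List (Option (Int × Int))) (j : Int) : List (Option (Int × Int)) :=
  match dp.getD (j-1).toNat none with
  | none => dp
  | some (lo, hi) =>
    let clo := min (x * lo) (x * hi)
    let chi := max (x * lo) (x * hi)
    match dp.getD j.toNat none with
    | none => dp.set j.toNat (some (clo, chi))
    | some p => dp.set j.toNat (some (min p.1 clo, max p.2 chi))

-- 'for j in range(k, 0, -1): …'
def pvStepX (k : Int) (dp : List (Option (Int × Int))) (x : Int) : List (Option (Int × Int)) :=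
  (PySem.List.pyRange k 0 (-1)).foldl (pvStepJ x) dp

def product_pair_alt (lst : List Int) (k : Int) : Option (List Int) :=
  if (lst.length : Int) < k then none
  else
    let dp0 := (List.replicate (k+1).toNat (none : Option (Int × Int))).set 0 (some (1, 1))
    let dp := lst.foldl (pvStepX k) dp0
    match dp.getD k.toNat none with
    | some (lo, hi) => some [lo, hi]
    | none => none  -- unreachable on Pre_: dp[k] is filled once k elements have been processed

-- ===== PRECONDITION & SPEC =====
-- Pre_ excludes exactly k < 0, where Python A raises ValueError (itertools.combinations) and B raises IndexError.
def Pre_product_pair (lst : List Int) (k : Int) : Prop := 0 ≤ k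
instance (lst : List Int) (k : Int) : Decidable (Pre_product_pair lst k) := by unfold Pre_product_pair; infer_instance
def pvWitness_product_pair : List Int × Int := ([-2, 3, 5], 2)
def Spec_product_pair (lst : List Int) (k : Int) (out : Option (List Int)) : Prop := out = product_pair_alt lst k
instance (lst : List Int) (k : Int) (out : Option (List Int)) : Decidable (Spec_product_pair lst k out) := by unfold Spec_product_pair; infer_instance

-- ===== CLAIM (what is proved, stated in full; the proofs are below) =====
def Claim_equal_product_pair : Prop := ∀ (lst : List Int) (k : Int), Dom_product_pair lst k → Pre_product_pair lst k → Spec_product_pair lst k (product_pair lst k)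

-- ===== LEMMAS AND PROOFS =====

-- product of a combination, as A's inner loop computes it
def prodl (c : List Int) : Int := c.foldl (fun a y => a * y) 1
-- the products of all r-element sub-combinations
def pvP (xs : List Int) (r : Nat) : List Int := (PySem.List.combinations xs r).map prodl
-- min / max value of a list (none if empty)
def mmin : List Int → Option Int | [] => none | h :: t => some (t.foldl min h)
def mmax : List Int → Option Int | [] => none | h :: t => some (t.foldl max h)
def mm (L : List Int) : Option (Int × Int) :=
  match mmin L, mmax L with
  | some a, some b => some (a, b)
  | _, _ => none
-- the per-entry update performed by pvStepJ
def pvU (x : Int) (prev cur : Option (Int × Int)) : Option (Int × Int) :=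
  match prev with
  | none => cur
  | some (lo, hi) =>
    let clo := min (x * lo) (x * hi)
    let chi := max (x * lo) (x * hi)
    match cur with
    | none => some (clo, chi)
    | some p => some (min p.1 clo, max p.2 chi)
-- the DP table B's dp list equals after processing xs
def pvTable (xs : List Int) (n : Nat) : List (Option (Int × Int)) :=
  (List.range (n+1)).map (fun j => mm (pvP xs j))

lemma mmin_char (L : List Int) (m : Int) : mmin L = some m ↔ m ∈ L ∧ ∀ y ∈ L, m ≤ y := by
  cases L with
  | nil => simp [mmin]
  | cons h t =>
    have hmem : t.foldl min h ∈ h :: t := by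
      rcases PySem.List.foldl_min_mem t h with h2 | h2 <;> simp [h2]
    have hlb : ∀ y ∈ h :: t, t.foldl min h ≤ y := by
      intro y hy
      rcases List.mem_cons.1 hy with rfl | hy
      · exact (PySem.List.foldl_min_le t y).1
      · exact (PySem.List.foldl_min_le t h).2 y hy
    simp only [mmin, Option.some.injEq]
    constructor
    · rintro rfl; exact ⟨hmem, hlb⟩
    · rintro ⟨hm, hub⟩
      exact le_antisymm (hlb m hm) (hub _ hmem)

lemma mmax_char (L : List Int) (m : Int) : mmax L = some m ↔ m ∈ L ∧ ∀ y ∈ L, y ≤ m := by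
  cases L with
  | nil => simp [mmax]
  | cons h t =>
    have hmem : t.foldl max h ∈ h :: t := by
      rcases PySem.List.foldl_max_mem t h with h2 | h2 <;> simp [h2]
    have hub : ∀ y ∈ h :: t, y ≤ t.foldl max h := by
      intro y hy
      rcases List.mem_cons.1 hy with rfl | hy
      · exact (PySem.List.le_foldl_max t y).1
      · exact (PySem.List.le_foldl_max t h).2 y hy
    simp only [mmax, Option.some.injEq]
    constructor
    · rintro rfl; exact ⟨hmem, hub⟩
    · rintro ⟨hm, hup⟩
      exact le_antisymm (hup _ hmem) (hub m hm)
lemma mmin_ne_none (h : L ≠ []) : ∃ m, mmin L = some m := by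
  cases L with
  | nil => simp at h
  | cons a t => exact ⟨_, rfl⟩

lemma mmax_ne_none (h : L ≠ []) : ∃ m, mmax L = some m := by
  cases L with
  | nil => simp at h
  | cons a t => exact ⟨_, rfl⟩

lemma mm_eq_some_iff (L : List Int) (a b : Int) :
    mm L = some (a, b) ↔ mmin L = some a ∧ mmax L = some b := by
  unfold mm
  cases hL : mmin L with
  | none => cases L with
    | nil => simp [mmax]
    | cons h t => simp [mmin] at hL
  | some a' => cases hM : mmax L with
    | none => cases L with
      | nil => simp [mmin] at hL
      | cons h t => simp [mmax] at hM
    | some b' => simp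

lemma mm_nil : mm [] = none := rfl

lemma mm_eq_none_iff (L : List Int) : mm L = none ↔ L = [] := by
  constructor
  · intro h
    by_contra hne
    obtain ⟨a, ha⟩ := mmin_ne_none hne
    obtain ⟨b, hb⟩ := mmax_ne_none hne
    simp [mm, ha, hb] at h
  · rintro rfl; rfl

lemma mm_perm {L L' : List Int} (hp : L.Perm L') : mm L = mm L' := by
  cases hmm : mm L' with
  | none =>
    rw [mm_eq_none_iff] at hmm ⊢
    subst hmm; exact List.Perm.eq_nil hp
  | some p =>
    obtain ⟨a, b⟩ := p
    rw [mm_eq_some_iff] at hmm ⊢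
    rw [mmin_char] at *
    rw [mmax_char] at *
    obtain ⟨⟨h1, h2⟩, ⟨h3, h4⟩⟩ := hmm
    exact ⟨⟨hp.mem_iff.2 h1, fun y hy => h2 y (hp.mem_iff.1 hy)⟩,
           ⟨hp.mem_iff.2 h3, fun y hy => h4 y (hp.mem_iff.1 hy)⟩⟩

lemma mm_append_some {L M : List Int} {a b c d : Int}
    (hL : mm L = some (a, b)) (hM : mm M = some (c, d)) :
    mm (L ++ M) = some (min a c, max b d) := by
  rw [mm_eq_some_iff] at hL hM ⊢
  obtain ⟨hL1, hL2⟩ := hL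
  obtain ⟨hM1, hM2⟩ := hM
  rw [mmin_char] at hL1 hM1 ⊢
  rw [mmax_char] at hL2 hM2 ⊢
  constructor
  · constructor
    · rcases le_total a c with h | h
      · simp [min_eq_left h, hL1.1]
      · simp [min_eq_right h, hM1.1]
    · intro y hy
      rcases List.mem_append.1 hy with hy | hy
      · exact le_trans (min_le_left _ _) (hL1.2 y hy)
      · exact le_trans (min_le_right _ _) (hM1.2 y hy)
  · constructor
    · rcases le_total b d with h | h
      · simp [max_eq_right h, hM2.1]
      · simp [max_eq_left h, hL2.1]
    · intro y hy
      rcases List.mem_append.1 hy with hy | hy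
      · exact le_trans (hL2.2 y hy) (le_max_left _ _)
      · exact le_trans (hM2.2 y hy) (le_max_right _ _)

lemma mm_map_mul {L : List Int} {lo hi : Int} (x : Int) (h : mm L = some (lo, hi)) :
    mm (L.map (fun p => p * x)) = some (min (x * lo) (x * hi), max (x * lo) (x * hi)) := by
  rw [mm_eq_some_iff] at h ⊢
  obtain ⟨h1, h2⟩ := h
  rw [mmin_char] at h1 ⊢
  rw [mmax_char] at h2 ⊢
  have hlo : lo * x ∈ L.map (fun p => p * x) := List.mem_map_of_mem h1.1
  have hhi : hi * x ∈ L.map (fun p => p * x) := List.mem_map_of_mem h2.1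
  constructor
  · constructor
    · rcases le_total (x * lo) (x * hi) with h | h
      · rw [min_eq_left h, mul_comm]; exact hlo
      · rw [min_eq_right h, mul_comm]; exact hhi
    · intro y hy
      obtain ⟨p, hp, rfl⟩ := List.mem_map.1 hy
      rcases le_total 0 x with hx | hx
      · calc min (x * lo) (x * hi) ≤ x * lo := min_le_left _ _
          _ ≤ x * p := mul_le_mul_of_nonneg_left (h1.2 p hp) hx
          _ = p * x := mul_comm _ _
      · calc min (x * lo) (x * hi) ≤ x * hi := min_le_right _ _
          _ ≤ x * p := mul_le_mul_of_nonpos_left (h2.2 p hp) hx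
          _ = p * x := mul_comm _ _
  · constructor
    · rcases le_total (x * lo) (x * hi) with h | h
      · rw [max_eq_right h, mul_comm]; exact hhi
      · rw [max_eq_left h, mul_comm]; exact hlo
    · intro y hy
      obtain ⟨p, hp, rfl⟩ := List.mem_map.1 hy
      rcases le_total 0 x with hx | hx
      · calc (p * x : Int) = x * p := mul_comm _ _
          _ ≤ x * hi := mul_le_mul_of_nonneg_left (h2.2 p hp) hx
          _ ≤ max (x * lo) (x * hi) := le_max_right _ _
      · calc (p * x : Int) = x * p := mul_comm _ _
          _ ≤ x * lo := mul_le_mul_of_nonpos_left (h1.2 p hp) hx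
          _ ≤ max (x * lo) (x * hi) := le_max_left _ _
lemma combos_snoc_m (x : Int) (ys : List Int) : ∀ (j : Nat),
    ((PySem.List.combinations (ys ++ [x]) (j+1) : List (List Int)) : Multiset (List Int))
      = ↑(PySem.List.combinations ys (j+1)) + ↑((PySem.List.combinations ys j).map (fun c => c ++ [x])) := by
  induction ys with
  | nil =>
    intro j
    cases j with
    | zero =>
      simp [PySem.List.combinations_cons_succ, PySem.List.combinations_zero,
            PySem.List.combinations_nil_succ]
    | succ j' =>
      simp [PySem.List.combinations_cons_succ, PySem.List.combinations_nil_succ]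
  | cons y t ih =>
    intro j
    cases j with
    | zero =>
      rw [show (y :: t) ++ [x] = y :: (t ++ [x]) from rfl]
      rw [PySem.List.combinations_cons_succ y (t ++ [x]) 0]
      rw [PySem.List.combinations_cons_succ y t 0]
      have h0 := ih 0
      simp only [PySem.List.combinations_zero, ← Multiset.coe_add, ← Multiset.map_coe] at *
      rw [h0]
      abel
    | succ j' =>
      rw [show (y :: t) ++ [x] = y :: (t ++ [x]) from rfl]
      rw [PySem.List.combinations_cons_succ y (t ++ [x]) (j'+1)]
      rw [PySem.List.combinations_cons_succ y t (j'+1)]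
      rw [PySem.List.combinations_cons_succ y t j']
      have h1 := ih j'
      have h2 := ih (j'+1)
      simp only [List.map_append, ← Multiset.coe_add, ← Multiset.map_coe] at *
      rw [h1, h2]
      simp only [Multiset.map_add, Multiset.map_map, Function.comp, List.cons_append]
      abel

lemma combos_snoc (x : Int) (ys : List Int) (j : Nat) :
    (PySem.List.combinations (ys ++ [x]) (j+1)).Perm
      (PySem.List.combinations ys (j+1) ++ (PySem.List.combinations ys j).map (fun c => c ++ [x])) := by
  have h := combos_snoc_m x ys j
  rw [show ((PySem.List.combinations ys (j+1) : List (List Int)) : Multiset (List Int)) + ((PySem.List.combinations ys j).map (fun c => c ++ [x]) : List (List Int)) = ((PySem.List.combinations ys (j+1) ++ (PySem.List.combinations ys j).map (fun c => c ++ [x]) : List (List Int)) : Multiset (List Int)) from (Multiset.coe_add _ _).symm ▸ rfl] at h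
  exact Multiset.coe_eq_coe.mp h

lemma prodl_snoc (c : List Int) (x : Int) : prodl (c ++ [x]) = prodl c * x := by
  simp [prodl, List.foldl_append]

lemma pvP_snoc (ys : List Int) (x : Int) (j : Nat) :
    (pvP (ys ++ [x]) (j+1)).Perm (pvP ys (j+1) ++ (pvP ys j).map (fun p => p * x)) := by
  have h := (combos_snoc x ys j).map prodl
  have e : (PySem.List.combinations ys (j+1) ++ (PySem.List.combinations ys j).map (fun c => c ++ [x])).map prodl
         = pvP ys (j+1) ++ (pvP ys j).map (fun p => p * x) := by
    simp [pvP, List.map_append, List.map_map, Function.comp, prodl_snoc]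
  rw [e] at h
  exact h

lemma pvP_zero (ys : List Int) : pvP ys 0 = [1] := by
  simp [pvP, PySem.List.combinations_zero, prodl]

lemma mm_pvP_snoc (ys : List Int) (x : Int) (j : Nat) :
    mm (pvP (ys ++ [x]) (j+1)) = pvU x (mm (pvP ys j)) (mm (pvP ys (j+1))) := by
  rw [mm_perm (pvP_snoc ys x j)]
  cases hprev : mm (pvP ys j) with
  | none =>
    rw [mm_eq_none_iff] at hprev
    simp [hprev, pvU]
  | some p =>
    obtain ⟨lo, hi⟩ := p
    have hmap := mm_map_mul x hprev
    cases hcur : mm (pvP ys (j+1)) with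
    | none =>
      rw [mm_eq_none_iff] at hcur
      simp only [hcur, List.nil_append]
      rw [hmap]; rfl
    | some q =>
      obtain ⟨a, b⟩ := q
      rw [mm_append_some hcur hmap]; rfl
lemma getD_set_lt (dp : List (Option (Int × Int))) (n : Nat) (v : Option (Int × Int)) (i : Nat)
    (hn : n < dp.length) :
    (dp.set n v).getD i none = if i = n then v else dp.getD i none := by
  simp only [List.getD_eq_getElem?_getD, List.getElem?_set]
  split
  · next h => subst h; simp
  · next h => rw [if_neg (fun hh => h hh.symm)]

lemma stepJ_spec (x : Int) (dp : List (Option (Int × Int))) (j : Int) (h1 : 1 ≤ j)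
    (h2 : j.toNat < dp.length) :
    (pvStepJ x dp j).length = dp.length ∧
    ∀ i : Nat, (pvStepJ x dp j).getD i none =
      if i = j.toNat then pvU x (dp.getD (j.toNat - 1) none) (dp.getD j.toNat none)
      else dp.getD i none := by
  have hj1 : (j-1).toNat = j.toNat - 1 := by omega
  unfold pvStepJ
  rw [hj1]
  cases hp : dp.getD (j.toNat - 1) none with
  | none =>
    refine ⟨rfl, fun i => ?_⟩
    simp only [pvU]
    split <;> simp_all
  | some p =>
    obtain ⟨lo, hi⟩ := p
    cases hc : dp.getD j.toNat none with
    | none =>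
      refine ⟨by simp, fun i => ?_⟩
      rw [getD_set_lt _ _ _ _ h2]
      simp [pvU]
    | some q =>
      refine ⟨by simp, fun i => ?_⟩
      rw [getD_set_lt _ _ _ _ h2]
      simp [pvU]
lemma descFold (x : Int) : ∀ (m : Nat) (dp : List (Option (Int × Int))), m < dp.length →
    ((PySem.List.pyRange (m : Int) 0 (-1)).foldl (pvStepJ x) dp).length = dp.length ∧
    ∀ i : Nat, ((PySem.List.pyRange (m : Int) 0 (-1)).foldl (pvStepJ x) dp).getD i none =
      if 1 ≤ i ∧ i ≤ m then pvU x (dp.getD (i-1) none) (dp.getD i none) else dp.getD i none := by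
  intro m
  induction m with
  | zero =>
    intro dp h
    rw [PySem.List.pyRange_neg_one_eq_nil (by norm_num)]
    exact ⟨rfl, fun i => by rw [List.foldl_nil, if_neg (by omega)]⟩
  | succ m ih =>
    intro dp h
    have hcons : PySem.List.pyRange ((m+1 : Nat) : Int) 0 (-1)
        = ((m+1 : Nat) : Int) :: PySem.List.pyRange (((m+1 : Nat) : Int) - 1) 0 (-1) :=
      PySem.List.pyRange_neg_one_cons (by exact_mod_cast Nat.succ_pos m)
    have hsub : (((m+1 : Nat) : Int) - 1) = (m : Int) := by push_cast; ring
    rw [hcons, hsub, List.foldl_cons]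
    have htn : ((((m:Nat)+1 : Nat) : Int)).toNat = m + 1 := by omega
    have hs := stepJ_spec x dp ((m+1 : Nat) : Int) (by exact_mod_cast Nat.succ_le_succ (Nat.zero_le m)) (by rw [htn]; exact h)
    set dp₁ := pvStepJ x dp ((m+1 : Nat) : Int) with hdp₁
    have hlen1 : dp₁.length = dp.length := hs.1
    have ihh := ih dp₁ (by rw [hlen1]; omega)
    refine ⟨by rw [ihh.1, hlen1], fun i => ?_⟩
    rw [ihh.2 i]
    by_cases hi1 : 1 ≤ i ∧ i ≤ m
    · rw [if_pos hi1, if_pos (⟨hi1.1, by omega⟩ : 1 ≤ i ∧ i ≤ m + 1)]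
      have e1 : dp₁.getD (i-1) none = dp.getD (i-1) none := by
        rw [hs.2 (i-1), htn, if_neg (by omega)]
      have e2 : dp₁.getD i none = dp.getD i none := by
        rw [hs.2 i, htn, if_neg (by omega)]
      rw [e1, e2]
    · rw [if_neg hi1]
      by_cases hi2 : i = m + 1
      · subst hi2
        rw [hs.2 (m+1), htn, if_pos rfl, if_pos (by omega)]
      · rw [hs.2 i, htn, if_neg hi2, if_neg (by omega)]
lemma table_length (xs : List Int) (n : Nat) : (pvTable xs n).length = n+1 := by
  simp [pvTable]

lemma table_getD (xs : List Int) (n i : Nat) :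
    (pvTable xs n).getD i none = if i ≤ n then mm (pvP xs i) else none := by
  simp only [pvTable, List.getD_eq_getElem?_getD, List.getElem?_map]
  split
  · next h => rw [List.getElem?_range (by omega)]; rfl
  · next h => rw [List.getElem?_eq_none (by simpa using by omega)]; rfl

lemma eq_of_getD (L M : List (Option (Int × Int))) (hl : L.length = M.length)
    (h : ∀ i, L.getD i none = M.getD i none) : L = M := by
  apply List.ext_getElem?
  intro i
  by_cases hi : i < L.length
  · have h1 : L[i]? = some L[i] := List.getElem?_eq_getElem hi
    have h2 : M[i]? = some M[i] := List.getElem?_eq_getElem (hl ▸ hi)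
    have hgd := h i
    rw [List.getD_eq_getElem?_getD, List.getD_eq_getElem?_getD, h1, h2] at hgd
    simp only [Option.getD_some] at hgd
    rw [h1, h2, hgd]
  · rw [List.getElem?_eq_none (by omega), List.getElem?_eq_none (by omega)]

lemma stepX_table (n : Nat) (ys : List Int) (x : Int) :
    pvStepX (n : Int) (pvTable ys n) x = pvTable (ys ++ [x]) n := by
  unfold pvStepX
  have hd := descFold x n (pvTable ys n) (by rw [table_length]; omega)
  apply eq_of_getD _ _ (by rw [hd.1, table_length, table_length])
  intro i
  rw [hd.2 i, table_getD ys n (i-1), table_getD ys n i, table_getD (ys ++ [x]) n i]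
  by_cases hi : 1 ≤ i ∧ i ≤ n
  · rw [if_pos hi, if_pos hi.2, if_pos hi.2, if_pos (show i - 1 ≤ n by omega)]
    obtain ⟨i', rfl⟩ : ∃ i', i = i' + 1 := ⟨i - 1, by omega⟩
    rw [mm_pvP_snoc ys x i']
    simp
  · rw [if_neg hi]
    by_cases h0 : i = 0
    · subst h0
      rw [if_pos (by omega), if_pos (by omega), pvP_zero, pvP_zero]
    · rw [if_neg (by omega), if_neg (by omega)]

lemma foldAll (n : Nat) : ∀ (lst ys : List Int),
    lst.foldl (pvStepX (n : Int)) (pvTable ys n) = pvTable (ys ++ lst) n := by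
  intro lst
  induction lst with
  | nil => intro ys; simp
  | cons x rest ih =>
    intro ys
    rw [List.foldl_cons, stepX_table, ih (ys ++ [x])]
    simp

lemma table_nil (n : Nat) :
    (List.replicate (n+1) (none : Option (Int × Int))).set 0 (some (1, 1)) = pvTable [] n := by
  apply eq_of_getD _ _ (by simp [table_length])
  intro i
  rw [table_getD]
  rcases Nat.eq_zero_or_pos i with rfl | hpos
  · rw [getD_set_lt _ _ _ _ (by simp), if_pos rfl, if_pos (by omega), pvP_zero]
    rfl
  · rw [getD_set_lt _ _ _ _ (by simp), if_neg (by omega)]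
    by_cases hi : i ≤ n
    · rw [if_pos hi]
      obtain ⟨i', rfl⟩ : ∃ i', i = i' + 1 := ⟨i - 1, by omega⟩
      have : pvP [] (i'+1) = [] := by
        simp [pvP, PySem.List.combinations_nil_succ]
      rw [this, mm_nil, List.getD_eq_getElem?_getD, List.getElem?_replicate]
      split <;> rfl
    · rw [if_neg hi, List.getD_eq_getElem?_getD, List.getElem?_replicate]
      split <;> rfl

lemma combos_ne_nil (xs : List Int) (n : Nat) (h : n ≤ xs.length) :
    PySem.List.combinations xs n ≠ [] := by
  have hmem : xs.take n ∈ PySem.List.combinations xs n := by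
    rw [PySem.List.mem_combinations_iff]
    exact ⟨List.take_sublist _ _, by simp [List.length_take]; omega⟩
  exact List.ne_nil_of_mem hmem
lemma min?_eq_mmin (l : List Int) : PySem.List.min? l (fun v => v) = mmin l := by
  cases l with
  | nil => simp [mmin, PySem.List.min?_eq_none_iff]
  | cons h t => rw [PySem.List.min?_id_cons]; rfl

lemma max?_eq_mmax (l : List Int) : PySem.List.max? l (fun v => v) = mmax l := by
  cases l with
  | nil => simp [mmax, PySem.List.max?_eq_none_iff]
  | cons h t => rw [PySem.List.max?_id_cons]; rfl

theorem ab_agree (lst : List Int) (k : Int) (hpre : 0 ≤ k) :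
    product_pair lst k = product_pair_alt lst k := by
  unfold product_pair product_pair_alt
  by_cases hlen : (lst.length : Int) < k
  · rw [if_pos hlen, if_pos hlen]
  · rw [if_neg hlen, if_neg hlen]
    have hkn : ((k.toNat : Nat) : Int) = k := Int.toNat_of_nonneg hpre
    have hle : k.toNat ≤ lst.length := by omega
    have hk1 : (k+1).toNat = k.toNat + 1 := by omega
    -- B's dp equals the table
    have hdp : lst.foldl (pvStepX k) ((List.replicate (k+1).toNat (none : Option (Int × Int))).set 0 (some (1, 1)))
        = pvTable lst k.toNat := by
      rw [hk1, table_nil k.toNat]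
      have := foldAll k.toNat lst []
      rw [hkn] at this
      simpa using this
    -- A's list of products is nonempty
    have hne : pvP lst k.toNat ≠ [] := by
      intro hnil
      apply combos_ne_nil lst k.toNat hle
      have := congrArg List.length hnil
      simp only [pvP, List.length_map] at this
      exact List.eq_nil_of_length_eq_zero this
    obtain ⟨mn, hmn⟩ := mmin_ne_none hne
    obtain ⟨mx, hmx⟩ := mmax_ne_none hne
    have hmm : mm (pvP lst k.toNat) = some (mn, mx) := by
      rw [mm_eq_some_iff]; exact ⟨hmn, hmx⟩
    have hl : (PySem.List.combinations lst k.toNat).map (fun c => c.foldl (fun a y => a * y) 1)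
        = pvP lst k.toNat := rfl
    simp only [hl, min?_eq_mmin, max?_eq_mmax, hmn, hmx, hdp, table_getD, le_refl, if_true, hmm]

-- ===== VERDICT (by name: the statement is the Claim_ definition above) =====
theorem product_pair_spec : Claim_equal_product_pair := by
  intro lst k _ hpre
  show product_pair lst k = product_pair_alt lst k
  exact ab_agree lst k hpre
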